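-- pv_equiv track=rewrite | github.com/mickaelSASL/term | exo/1-facile/1250-exclamations/exo_corr.py | nb_max_consecutifs
-- ===== SOURCE A (Python) =====
-- def nb_max_consecutifs(motif, phrase):
--     nb_max = 0
--     nb_courant = 0
--     for caractere in phrase:
--         if caractere == motif:
--             nb_courant += 1
--             if nb_courant > nb_max:
--                 nb_max = nb_courant
--         else:
--             nb_courant = 0
--     return nb_max
-- ===== SOURCE B (Python) =====
-- def nb_max_consecutifs(motif, phrase):
--     # Run-splitting scan: jump over each maximal run of equal characters at once.
--     best = 0
--     i = 0
--     n = len(phrase)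
--     while i < n:
--         j = i
--         while j < n and phrase[j] == phrase[i]:
--             j += 1
--         if phrase[i] == motif and j - i > best:
--             best = j - i
--         i = j
--     return best
-- ===== Notes on version B (the rewrite author's own statement) =====
-- stated objective: alternative
-- what changed: Replaces A's per-character counter with counter-reset logic by a run-splitting two-pointer scan: each maximal run of equal characters is measured in one inner jump and compared to the best only once per run.
import Mathlib
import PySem

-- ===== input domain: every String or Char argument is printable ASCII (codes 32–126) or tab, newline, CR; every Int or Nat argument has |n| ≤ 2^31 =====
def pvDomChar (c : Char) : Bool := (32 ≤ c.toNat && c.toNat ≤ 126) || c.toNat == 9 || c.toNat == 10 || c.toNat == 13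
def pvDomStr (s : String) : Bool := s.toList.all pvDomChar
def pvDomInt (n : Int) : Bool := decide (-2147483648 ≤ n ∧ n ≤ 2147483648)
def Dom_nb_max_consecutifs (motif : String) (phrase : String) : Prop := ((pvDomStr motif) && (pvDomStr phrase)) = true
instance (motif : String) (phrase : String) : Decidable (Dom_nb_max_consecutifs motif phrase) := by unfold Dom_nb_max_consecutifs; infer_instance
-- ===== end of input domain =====

-- B differs from A by a run-splitting two-pointer scan (one comparison to the best per maximal
-- run) instead of A's per-character counter with reset; same return value, no side effects.

-- ===== PORT A =====
-- A's for-loop over the characters, carrying (nb_max, nb_courant) as the loop state.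
def pvALoop (motif : String) : List Char → Int → Int → Int
  | [], nbMax, _ => nbMax
  | c :: rest, nbMax, nbCur =>
    if String.ofList [c] = motif then
      let cur := nbCur + 1
      pvALoop motif rest (if cur > nbMax then cur else nbMax) cur
    else
      pvALoop motif rest nbMax 0

def nb_max_consecutifs (motif : String) (phrase : String) : Int :=
  pvALoop motif phrase.toList 0 0

-- ===== PORT B =====
-- B's outer while loop: take the whole maximal run at the front (the inner `while j < n and
-- phrase[j] == phrase[i]` = takeWhile/dropWhile), compare its length to the best, continue at j.
def pvBLoop (motif : String) : List Char → Int
  | [] => 0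
  | c :: rest =>
    let run := rest.takeWhile (· = c)
    let d := rest.dropWhile (· = c)
    let runLen : Int := run.length + 1
    let restBest := pvBLoop motif d
    if String.ofList [c] = motif ∧ runLen > restBest then runLen else restBest
termination_by l => l.length
decreasing_by
  simpa using Nat.lt_succ_of_le (List.length_dropWhile_le _ _)

def nb_max_consecutifs_alt (motif : String) (phrase : String) : Int :=
  pvBLoop motif phrase.toList

-- ===== PRECONDITION & SPEC =====
def Spec_nb_max_consecutifs (motif : String) (phrase : String) (out : Int) : Prop := out = nb_max_consecutifs_alt motif phrase
instance (motif : String) (phrase : String) (out : Int) : Decidable (Spec_nb_max_consecutifs motif phrase out) := by unfold Spec_nb_max_consecutifs; infer_instance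

-- ===== CLAIM (what is proved, stated in full; the proofs are below) =====
def Claim_equal_nb_max_consecutifs : Prop := ∀ (motif : String) (phrase : String), Dom_nb_max_consecutifs motif phrase → Spec_nb_max_consecutifs motif phrase (nb_max_consecutifs motif phrase)

-- ===== LEMMAS AND PROOFS =====

-- Character-wise "best from here given a carry of nbCur matching characters just seen".
def pvH (motif : String) : List Char → Int → Int
  | [], _ => 0
  | c :: rest, carry =>
    if String.ofList [c] = motif then max (carry + 1) (pvH motif rest (carry + 1))
    else pvH motif rest 0

theorem pvH_nonneg (motif : String) (l : List Char) (carry : Int) : 0 ≤ pvH motif l carry := by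
  induction l generalizing carry with
  | nil => simp [pvH]
  | cons c rest ih =>
    simp only [pvH]
    split
    · exact le_trans (ih (carry + 1)) (le_max_right _ _)
    · exact ih 0

theorem pvALoop_eq_pvH (motif : String) (l : List Char) (nbMax nbCur : Int) (h : 0 ≤ nbMax) :
    pvALoop motif l nbMax nbCur = max nbMax (pvH motif l nbCur) := by
  induction l generalizing nbMax nbCur with
  | nil => simp [pvALoop, pvH]; omega
  | cons c rest ih =>
    simp only [pvALoop, pvH]
    split
    · rw [ih _ _ (by omega)]
      have : (if nbCur + 1 > nbMax then nbCur + 1 else nbMax) = max nbMax (nbCur + 1) := by omega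
      rw [this]
      omega
    · exact ih _ _ h

-- If the first character of l does not match motif (or l is empty), the carry is irrelevant.
theorem pvH_carry_irrel (motif : String) (l : List Char) (carry : Int)
    (h : ∀ x, l.head? = some x → ¬ (String.ofList [x] = motif)) :
    pvH motif l carry = pvH motif l 0 := by
  cases l with
  | nil => rfl
  | cons c rest =>
    have hc := h c rfl
    simp [pvH, hc]

-- A maximal run of n copies of c at the front, n ≥ 1, the remainder d not starting with c.
theorem pvH_run (motif : String) (c : Char) (d : List Char) (n : Nat) (hn : 1 ≤ n)
    (hd : ∀ x, d.head? = some x → x ≠ c) (carry : Int) :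
    pvH motif (List.replicate n c ++ d) carry =
      if String.ofList [c] = motif then max (carry + n) (pvH motif d 0) else pvH motif d 0 := by
  induction n generalizing carry with
  | zero => omega
  | succ n ih =>
    have hirrel : String.ofList [c] = motif → ∀ carry', pvH motif d carry' = pvH motif d 0 := by
      intro hm carry'
      apply pvH_carry_irrel
      intro x hx heq
      apply hd x hx
      have h2 := congrArg String.toList (heq.trans hm.symm)
      simpa using h2
    rcases Nat.eq_zero_or_pos n with h0 | hpos
    · subst h0
      have hr : List.replicate 1 c ++ d = c :: d := rfl
      rw [hr]
      simp only [pvH]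
      by_cases hm : String.ofList [c] = motif
      · rw [if_pos hm, if_pos hm, hirrel hm (carry + 1)]
        norm_num
      · rw [if_neg hm, if_neg hm]
    · have hrep : List.replicate (n + 1) c ++ d = c :: (List.replicate n c ++ d) := rfl
      rw [hrep]
      simp only [pvH]
      by_cases hm : String.ofList [c] = motif
      · rw [if_pos hm, if_pos hm, ih hpos (carry + 1), if_pos hm]
        push_cast
        omega
      · rw [if_neg hm, if_neg hm, ih hpos 0, if_neg hm]

theorem takeWhile_eq_replicate (c : Char) (l : List Char) :
    l.takeWhile (· = c) = List.replicate (l.takeWhile (· = c)).length c := by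
  induction l with
  | nil => rfl
  | cons a rest ih =>
    by_cases h : a = c
    · subst h
      rw [List.takeWhile_cons_of_pos (by simp)]
      simp only [List.length_cons, List.replicate_succ]
      rw [← ih]
    · rw [List.takeWhile_cons_of_neg (by simp [h])]
      rfl

theorem dropWhile_head_ne (c : Char) (l : List Char) (x : Char)
    (hx : (l.dropWhile (· = c)).head? = some x) : x ≠ c := by
  have := List.head?_dropWhile_not (p := (· = c)) (l := l)
  rw [hx] at this
  simpa using this

theorem pvH_eq_pvBLoop (motif : String) (l : List Char) :
    pvH motif l 0 = pvBLoop motif l := by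
  induction hn : l.length using Nat.strong_induction_on generalizing l with
  | _ n ih =>
    cases l with
    | nil => simp [pvH, pvBLoop]
    | cons c rest =>
      have hsplit : c :: rest = List.replicate ((rest.takeWhile (· = c)).length + 1) c
          ++ rest.dropWhile (· = c) := by
        rw [List.replicate_succ, List.cons_append]
        congr 1
        conv_lhs => rw [← List.takeWhile_append_dropWhile (p := (· = c)) (l := rest)]
        rw [← takeWhile_eq_replicate]
      have hlt : (rest.dropWhile (· = c)).length < n := by
        subst hn
        simpa using Nat.lt_succ_of_le (List.length_dropWhile_le _ _)
      have hd := ih _ hlt (rest.dropWhile (· = c)) rfl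
      have hnn := pvH_nonneg motif (rest.dropWhile (· = c)) 0
      conv_lhs => rw [hsplit]
      rw [pvH_run motif c _ _ (by omega) (fun x hx => dropWhile_head_ne c rest x hx) 0]
      simp only [pvBLoop]
      rw [← hd]
      by_cases hm : String.ofList [c] = motif
      · rw [if_pos hm]
        by_cases hgt : ((rest.takeWhile (· = c)).length : Int) + 1 > pvH motif (rest.dropWhile (· = c)) 0
        · rw [if_pos ⟨hm, hgt⟩]; push_cast; omega
        · rw [if_neg (by intro h; exact hgt h.2)]; push_cast; omega
      · rw [if_neg hm, if_neg (by intro h; exact hm h.1)]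

-- ===== VERDICT (by name: the statement is the Claim_ definition above) =====
theorem nb_max_consecutifs_spec : Claim_equal_nb_max_consecutifs := by
  intro motif phrase _
  show nb_max_consecutifs motif phrase = nb_max_consecutifs_alt motif phrase
  unfold nb_max_consecutifs nb_max_consecutifs_alt
  rw [pvALoop_eq_pvH motif _ 0 0 le_rfl, ← pvH_eq_pvBLoop]
  have := pvH_nonneg motif phrase.toList 0
  omega
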